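-- pv_equiv track=rewrite | github.com/USG-22-23-IBCS/Happymemoryworker | LoopListPractice.py | problem3
-- ===== SOURCE A (Python) =====
-- def problem3(l):
--     total = 0
--     found2 = False
--
--     for elem in l:
--         if elem == 2:
--             found2 = True
--
--         if found2 == False:
--             total = total + elem
--
--         if found2 == True:
--             if elem == 3:
--                 found2 == False
--
--
--     return total
-- ===== SOURCE B (Python) =====
-- def problem3(l):
--     if 2 in l:
--         return sum(l[:l.index(2)])
--     return sum(l)
-- ===== Notes on version B (the rewrite author's own statement) =====
-- stated objective: simpler
-- what changed: Replaces the flag-driven accumulator loop (with its dead elem==3 branch) by locating the first 2 with l.index(2) and summing the slice before it, summing the whole list when 2 is absent.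
import Mathlib
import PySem

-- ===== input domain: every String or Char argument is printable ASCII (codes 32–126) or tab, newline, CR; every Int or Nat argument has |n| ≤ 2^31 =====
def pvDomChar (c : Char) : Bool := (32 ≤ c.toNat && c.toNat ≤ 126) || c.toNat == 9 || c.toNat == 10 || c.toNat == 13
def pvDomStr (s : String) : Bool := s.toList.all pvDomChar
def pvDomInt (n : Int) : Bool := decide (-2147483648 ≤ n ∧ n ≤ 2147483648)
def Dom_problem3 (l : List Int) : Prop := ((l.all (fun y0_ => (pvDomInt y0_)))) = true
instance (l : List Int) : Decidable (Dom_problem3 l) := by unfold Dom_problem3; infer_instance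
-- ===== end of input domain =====

-- B replaces A's flag-driven accumulator loop (whose elem==3 branch is dead code) with
-- locate-first-2 (l.index) plus a slice sum; equivalence of return values is proved below.
-- ===== PORT A =====
-- the loop body of A, one step: update found2, then conditionally add
def p3step (s : Int × Bool) (elem : Int) : Int × Bool :=
  let found2 : Bool := if elem == 2 then true else s.2
  let total : Int := if found2 == false then s.1 + elem else s.1
  -- Python's 'if found2 == True: if elem == 3: found2 == False' is a no-op comparison
  (total, found2)

def problem3 (l : List Int) : Int :=
  (l.foldl p3step (0, false)).1

-- ===== PORT B =====
def problem3_alt (l : List Int) : Int :=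
  if l.contains 2 then
    match PySem.List.index? l 2 with
    | some i => (PySem.List.slice l none (some (i : Int))).sum
    | none => l.sum
  else l.sum

-- ===== PRECONDITION & SPEC =====
def Spec_problem3 (l : List Int) (out : Int) : Prop := out = problem3_alt l
instance (l : List Int) (out : Int) : Decidable (Spec_problem3 l out) := by unfold Spec_problem3; infer_instance

-- ===== CLAIM (what is proved, stated in full; the proofs are below) =====
def Claim_equal_problem3 : Prop := ∀ (l : List Int), Dom_problem3 l → Spec_problem3 l (problem3 l)

-- ===== LEMMAS AND PROOFS =====
theorem p3step_true (t : Int) (e : Int) : p3step (t, true) e = (t, true) := by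
  simp [p3step]

theorem p3step_two (t : Int) : p3step (t, false) 2 = (t, true) := by
  simp [p3step]

theorem p3step_ne (t : Int) (e : Int) (h : e ≠ 2) : p3step (t, false) e = (t + e, false) := by
  simp [p3step, h]

-- once the flag is set, A's loop never changes the state again
theorem foldl_p3step_true (l : List Int) (t : Int) :
    l.foldl p3step (t, true) = (t, true) := by
  induction l with
  | nil => rfl
  | cons x xs ih => rw [List.foldl_cons, p3step_true]; exact ih

-- shift the accumulator out of A's loop
theorem foldl_p3step_shift (l : List Int) (t : Int) :
    (l.foldl p3step (t, false)).1 = t + (l.foldl p3step (0, false)).1 := by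
  induction l generalizing t with
  | nil => simp
  | cons x xs ih =>
    by_cases hx : x = 2
    · subst hx
      rw [List.foldl_cons, List.foldl_cons, p3step_two, p3step_two,
        foldl_p3step_true, foldl_p3step_true]
      simp
    · rw [List.foldl_cons, List.foldl_cons, p3step_ne _ _ hx, p3step_ne _ _ hx,
        ih (t + x), ih (0 + x)]
      ring

-- when the head is not 2, B satisfies the recurrence B (x :: xs) = x + B xs
theorem problem3_alt_cons (x : Int) (xs : List Int) (hx : x ≠ 2) :
    problem3_alt (x :: xs) = x + problem3_alt xs := by
  unfold problem3_alt
  have hcontains : (x :: xs).contains 2 = xs.contains 2 := by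
    simp
    intro h; exact absurd h.symm hx
  rw [hcontains]
  by_cases h : xs.contains 2
  · have hmem : (2 : Int) ∈ xs := by simpa using h
    have hsome : (PySem.List.index? xs 2).isSome := by
      rw [PySem.List.index?_isSome_iff]; exact hmem
    obtain ⟨i, hi⟩ := Option.isSome_iff_exists.mp hsome
    have hcons : PySem.List.index? (x :: xs) 2 = some (i + 1) := by
      rw [PySem.List.index?_cons_of_ne xs hx, hi]; rfl
    rw [h, if_pos rfl, if_pos rfl, hcons, hi]
    show (PySem.List.slice (x :: xs) none (some ((i + 1 : Nat) : Int))).sum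
      = x + (PySem.List.slice xs none (some ((i : Nat) : Int))).sum
    rw [PySem.List.slice_to_natCast, PySem.List.slice_to_natCast,
      List.take_succ_cons, List.sum_cons]
  · have hnone : PySem.List.index? xs 2 = none := by
      rw [PySem.List.index?_eq_none_iff]; simpa using h
    have hcons : PySem.List.index? (x :: xs) 2 = none := by
      rw [PySem.List.index?_cons_of_ne xs hx, hnone]; rfl
    rw [Bool.eq_false_iff.mpr h, if_neg (by simp), if_neg (by simp), List.sum_cons]

theorem problem3_eq (l : List Int) : problem3 l = problem3_alt l := by
  induction l with
  | nil => rfl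
  | cons x xs ih =>
    by_cases hx : x = 2
    · subst hx
      unfold problem3 problem3_alt
      rw [List.foldl_cons, p3step_two, foldl_p3step_true]
      have hcons := PySem.List.index?_cons_self (2 : Int) xs
      rw [if_pos (by simp), hcons]
      show (0 : Int) = (PySem.List.slice (2 :: xs) none (some ((0 : Nat) : Int))).sum
      rw [PySem.List.slice_to_natCast]
      simp
    · have hA : problem3 (x :: xs) = x + problem3 xs := by
        unfold problem3
        rw [List.foldl_cons, p3step_ne _ _ hx, foldl_p3step_shift]
        ring
      rw [hA, ih, problem3_alt_cons x xs hx]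

-- ===== VERDICT (by name: the statement is the Claim_ definition above) =====
theorem problem3_spec : Claim_equal_problem3 := by
  intro l _
  unfold Spec_problem3
  exact problem3_eq l
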